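-- pv_equiv track=rewrite | github.com/koreno/webslit | webslit/utils.py | is_same_primary_domain
-- ===== SOURCE A (Python) =====
-- def is_same_primary_domain(domain1, domain2):
--     i = -1
--     dots = 0
--     l1 = len(domain1)
--     l2 = len(domain2)
--     m = min(l1, l2)
--
--     while i >= -m:
--         c1 = domain1[i]
--         c2 = domain2[i]
--
--         if c1 == c2:
--             if c1 == '.':
--                 dots += 1
--                 if dots == 2:
--                     return True
--         else:
--             return False
--
--         i -= 1
--
--     if l1 == l2:
--         return True
--
--     if dots == 0:
--         return False
--
--     c = domain1[i] if l1 > m else domain2[i]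
--     return c == '.'
-- ===== SOURCE B (Python) =====
-- def _last_two_labels(domain):
--     head, sep, last = domain.rpartition('.')
--     if not sep:
--         return [last]
--     return [head.rpartition('.')[2], last]
--
--
-- def is_same_primary_domain(domain1, domain2):
--     return _last_two_labels(domain1) == _last_two_labels(domain2)
-- ===== Notes on version B (the rewrite author's own statement) =====
-- stated objective: simpler
-- what changed: Replaces A's backward per-character simultaneous scan with dot counting by extracting each domain's last two dot-separated labels (two rpartition calls) and comparing the two label lists.
import Mathlib
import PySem

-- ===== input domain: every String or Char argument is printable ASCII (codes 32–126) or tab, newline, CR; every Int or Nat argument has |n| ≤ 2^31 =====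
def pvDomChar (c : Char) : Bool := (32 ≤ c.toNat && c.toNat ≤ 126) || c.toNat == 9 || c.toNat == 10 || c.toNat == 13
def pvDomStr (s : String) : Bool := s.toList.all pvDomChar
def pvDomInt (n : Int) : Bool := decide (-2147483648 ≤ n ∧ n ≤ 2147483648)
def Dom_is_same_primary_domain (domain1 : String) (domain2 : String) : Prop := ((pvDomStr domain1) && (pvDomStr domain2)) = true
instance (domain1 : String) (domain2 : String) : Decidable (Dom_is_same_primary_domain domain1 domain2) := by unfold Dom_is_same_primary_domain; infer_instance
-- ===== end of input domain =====

-- B replaces A's backward simultaneous character scan by extracting each domain's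
-- last two dot-separated labels and comparing the label lists (objective: simpler).

-- ===== PORT A =====
-- the while loop of A: i runs -1, -2, … while i >= -m
def pvAloop (d1 d2 : List Char) (l1 l2 m : Int) (i : Int) (dots : Nat) : Bool :=
  if _h : -m ≤ i then
    match PySem.List.pyGet? d1 i, PySem.List.pyGet? d2 i with
    | some c1, some c2 =>
      if c1 = c2 then
        if c1 = '.' then
          if dots + 1 = 2 then true
          else pvAloop d1 d2 l1 l2 m (i - 1) (dots + 1)
        else pvAloop d1 d2 l1 l2 m (i - 1) dots
      else false
    | _, _ => false  -- unreachable: while the loop runs, the Python index is in range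
  else
    if l1 = l2 then true
    else if dots = 0 then false
    else
      match (if l1 > m then PySem.List.pyGet? d1 i else PySem.List.pyGet? d2 i) with
      | some c => decide (c = '.')
      | none => false  -- unreachable: at loop exit i = -(m+1) and the longer string has length > m
termination_by (i + m + 1).toNat
decreasing_by all_goals omega

def is_same_primary_domain (domain1 : String) (domain2 : String) : Bool :=
  let l1 := PySem.Str.len domain1
  let l2 := PySem.Str.len domain2
  let m := min l1 l2
  pvAloop domain1.toList domain2.toList l1 l2 m (-1) 0

-- ===== PORT B =====
-- hand port of str.rpartition('.') (PySem has none): scan from the right for the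
-- last '.'; the Bool is 'separator found' (Python returns the separator string).
-- Exact: (head, sep, tail) with s = head ++ '.' ++ tail when found, ('', '', s) otherwise.
def pvRpartitionDot (s : List Char) : List Char × Bool × List Char :=
  let r := s.reverse
  let t := r.takeWhile (fun c => c ≠ '.')
  if t.length = r.length then ([], false, s)
  else ((r.drop (t.length + 1)).reverse, true, t.reverse)

-- port of _last_two_labels from Source B
def pvLastTwoLabels (s : List Char) : List (List Char) :=
  match pvRpartitionDot s with
  | (_, false, last) => [last]
  | (head, true, last) => [(pvRpartitionDot head).2.2, last]

def is_same_primary_domain_alt (domain1 : String) (domain2 : String) : Bool :=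
  pvLastTwoLabels domain1.toList == pvLastTwoLabels domain2.toList

-- ===== PRECONDITION & SPEC =====
def Spec_is_same_primary_domain (domain1 : String) (domain2 : String) (out : Bool) : Prop := out = is_same_primary_domain_alt domain1 domain2
instance (domain1 : String) (domain2 : String) (out : Bool) : Decidable (Spec_is_same_primary_domain domain1 domain2 out) := by unfold Spec_is_same_primary_domain; infer_instance

-- ===== CLAIM (what is proved, stated in full; the proofs are below) =====
def Claim_equal_is_same_primary_domain : Prop := ∀ (domain1 : String) (domain2 : String), Dom_is_same_primary_domain domain1 domain2 → Spec_is_same_primary_domain domain1 domain2 (is_same_primary_domain domain1 domain2)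

-- ===== LEMMAS AND PROOFS =====

-- A's loop, rephrased on the reversed character lists walked from the front
def pvSimul : List Char → List Char → Nat → Bool
  | c1 :: t1, c2 :: t2, dots =>
    if c1 = c2 then
      if c1 = '.' then
        if dots + 1 = 2 then true else pvSimul t1 t2 (dots + 1)
      else pvSimul t1 t2 dots
    else false
  | [], [], _ => true
  | [], c :: _, dots => if dots = 0 then false else decide (c = '.')
  | c :: _, [], dots => if dots = 0 then false else decide (c = '.')

-- the characters of the reversed string up to the first '.'
def pvTl (r : List Char) : List Char := r.takeWhile (fun c => c ≠ '.')

-- canonical key: the reversed last label, plus the reversed second-to-last label if a '.' exists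
def pvK (r : List Char) : Sum (List Char) (List Char × List Char) :=
  if '.' ∈ r then .inr (pvTl r, pvTl (r.drop ((pvTl r).length + 1))) else .inl r

theorem pvSimul_one (r1 : List Char) : ∀ r2 : List Char, pvSimul r1 r2 1 = (pvTl r1 == pvTl r2) := by
  induction r1 with
  | nil =>
    intro r2
    cases r2 with
    | nil => rfl
    | cons c t =>
      by_cases hc : c = '.' <;> simp [pvSimul, pvTl, hc]
  | cons c1 t1 ih =>
    intro r2
    cases r2 with
    | nil =>
      by_cases hc : c1 = '.' <;> simp [pvSimul, pvTl, hc]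
    | cons c2 t2 =>
      by_cases he : c1 = c2
      · subst he
        by_cases hc : c1 = '.'
        · simp [pvSimul, pvTl, hc]
        · simp [pvSimul, pvTl, hc, ih t2]
      · by_cases h1 : c1 = '.' <;> by_cases h2 : c2 = '.' <;>
          simp_all [pvSimul, pvTl]

theorem pvK_head (c : Char) (t : List Char) :
    (match pvK (c :: t) with
      | .inl r => r.head?
      | .inr (x1, _) => (x1 ++ ['.']).head?) = some c := by
  by_cases hc : c = '.'
  · subst hc
    simp [pvK, pvTl, List.takeWhile_cons]
  · by_cases hd : '.' ∈ t <;>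
      simp [pvK, pvTl, List.takeWhile_cons, hc, hd, Ne.symm hc]

theorem pvK_ne_of_head_ne (c1 c2 : Char) (t1 t2 : List Char) (he : c1 ≠ c2) :
    pvK (c1 :: t1) ≠ pvK (c2 :: t2) := by
  intro h
  have h1 := pvK_head c1 t1
  have h2 := pvK_head c2 t2
  rw [h] at h1
  rw [h1] at h2
  exact he (Option.some.injEq _ _ ▸ h2)

theorem pvSimul_zero (r1 : List Char) : ∀ r2 : List Char, pvSimul r1 r2 0 = decide (pvK r1 = pvK r2) := by
  induction r1 with
  | nil =>
    intro r2
    cases r2 with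
    | nil => rfl
    | cons c t =>
      have : pvK [] ≠ pvK (c :: t) := by
        unfold pvK
        split <;> split <;> simp_all [pvTl]
      simp [pvSimul, this]
  | cons c1 t1 ih =>
    intro r2
    cases r2 with
    | nil =>
      have : pvK (c1 :: t1) ≠ pvK [] := by
        unfold pvK
        split <;> split <;> simp_all [pvTl]
      simp [pvSimul, this]
    | cons c2 t2 =>
      by_cases he : c1 = c2
      · subst he
        by_cases hc : c1 = '.'
        · subst hc
          have hL : pvSimul ('.' :: t1) ('.' :: t2) 0 = pvSimul t1 t2 1 := by
            simp [pvSimul]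
          rw [hL, pvSimul_one]
          have hK1 : pvK ('.' :: t1) = .inr ([], pvTl t1) := by
            simp [pvK, pvTl, List.takeWhile_cons]
          have hK2 : pvK ('.' :: t2) = .inr ([], pvTl t2) := by
            simp [pvK, pvTl]
          rw [hK1, hK2]
          by_cases h : pvTl t1 = pvTl t2 <;> simp [h]
        · have hc' : ¬ ('.' = c1) := fun h => hc h.symm
          simp only [pvSimul, if_neg hc, ih t2]
          by_cases hd1 : '.' ∈ t1 <;> by_cases hd2 : '.' ∈ t2 <;>
            simp [pvK, pvTl, hc, hc', hd1, hd2, List.drop_succ_cons]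
      · have hne := pvK_ne_of_head_ne c1 c2 t1 t2 he
        simp [pvSimul, he, hne]

-- negative Python index into d read on the reversed list
theorem pvGet_neg (d : List Char) (j : Nat) (hj : j < d.length) :
    PySem.List.pyGet? d (-(j : Int) - 1) = some (d.reverse[j]'(by simpa using hj)) := by
  have h1 : (-(j : Int) - 1) = -((j + 1 : Nat) : Int) := by push_cast; ring
  rw [h1, PySem.List.pyGet?_neg_natCast d (j + 1) (by omega) (by omega)]
  rw [List.getElem?_eq_getElem (by omega)]
  congr 1
  rw [List.getElem_reverse]
  congr 1
  omega

theorem pvAloop_eq_simul (d1 d2 : List Char) :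
    ∀ (k j dots : Nat), min d1.length d2.length - j = k → j ≤ min d1.length d2.length →
    pvAloop d1 d2 d1.length d2.length ((min d1.length d2.length : Nat) : Int) (-(j : Int) - 1) dots
      = pvSimul (d1.reverse.drop j) (d2.reverse.drop j) dots := by
  intro k
  induction k with
  | zero =>
    intro j dots hk hj
    have hjm : j = min d1.length d2.length := by omega
    subst hjm
    rw [pvAloop]
    rw [dif_neg (by omega)]
    by_cases hl : d1.length = d2.length
    · have h1 : d1.reverse.drop (min d1.length d2.length) = [] := by
        rw [List.drop_eq_nil_iff]; simp; omega
      have h2 : d2.reverse.drop (min d1.length d2.length) = [] := by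
        rw [List.drop_eq_nil_iff]; simp; omega
      rw [h1, h2]
      rw [if_pos (by exact_mod_cast hl)]
      simp [pvSimul]
    · rw [if_neg (by exact_mod_cast hl)]
      rcases Nat.lt_or_ge d1.length d2.length with hlt | hge
      · -- d2 is longer; m = d1.length
        have h1 : d1.reverse.drop (min d1.length d2.length) = [] := by
          rw [List.drop_eq_nil_iff]; simp; omega
        have hlen : min d1.length d2.length < d2.reverse.length := by simp; omega
        have h2 : d2.reverse.drop (min d1.length d2.length)
            = d2.reverse[min d1.length d2.length]'hlen :: d2.reverse.drop (min d1.length d2.length + 1) := by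
          exact List.drop_eq_getElem_cons hlen
        rw [h1, h2]
        have hget : PySem.List.pyGet? d2 (-(min d1.length d2.length : Nat) - 1)
            = some (d2.reverse[min d1.length d2.length]'hlen) := by
          exact pvGet_neg d2 _ (by omega)
        have hcond : ¬ ((d1.length : Int) > ((min d1.length d2.length : Nat) : Int)) := by
          exact_mod_cast (by omega : ¬ d1.length > min d1.length d2.length)
        rw [if_neg hcond, hget]
        cases dots with
        | zero => simp [pvSimul]
        | succ n => simp [pvSimul]
      · -- d1 is longer
        have hlt : d2.length < d1.length := by omega
        have h2 : d2.reverse.drop (min d1.length d2.length) = [] := by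
          rw [List.drop_eq_nil_iff]; simp; omega
        have hlen : min d1.length d2.length < d1.reverse.length := by simp; omega
        have h1 : d1.reverse.drop (min d1.length d2.length)
            = d1.reverse[min d1.length d2.length]'hlen :: d1.reverse.drop (min d1.length d2.length + 1) := by
          exact List.drop_eq_getElem_cons hlen
        rw [h1, h2]
        have hget : PySem.List.pyGet? d1 (-(min d1.length d2.length : Nat) - 1)
            = some (d1.reverse[min d1.length d2.length]'hlen) := by
          exact pvGet_neg d1 _ (by omega)
        have hcond : ((d1.length : Int) > ((min d1.length d2.length : Nat) : Int)) := by
          exact_mod_cast (by omega : d1.length > min d1.length d2.length)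
        rw [if_pos hcond, hget]
        cases dots with
        | zero => simp [pvSimul]
        | succ n => simp [pvSimul]
  | succ k ih =>
    intro j dots hk hj
    have hjm : j < min d1.length d2.length := by omega
    have hlen1 : j < d1.reverse.length := by simp; omega
    have hlen2 : j < d2.reverse.length := by simp; omega
    rw [pvAloop]
    rw [dif_pos (by omega)]
    rw [pvGet_neg d1 j (by omega), pvGet_neg d2 j (by omega)]
    have h1 : d1.reverse.drop j = d1.reverse[j]'hlen1 :: d1.reverse.drop (j + 1) :=
      List.drop_eq_getElem_cons hlen1
    have h2 : d2.reverse.drop j = d2.reverse[j]'hlen2 :: d2.reverse.drop (j + 1) :=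
      List.drop_eq_getElem_cons hlen2
    rw [h1, h2]
    dsimp only
    have hstep : (-(j : Int) - 1 - 1) = (-((j + 1 : Nat) : Int) - 1) := by push_cast; ring
    by_cases he : d1.reverse[j]'hlen1 = d2.reverse[j]'hlen2
    · have he' : d2.reverse[j]'hlen2 = d1.reverse[j]'hlen1 := he.symm
      by_cases hc : d1.reverse[j]'hlen1 = '.'
      · have hc2 : d2.reverse[j]'hlen2 = '.' := he ▸ hc
        by_cases hd : dots + 1 = 2
        · rw [if_pos he, if_pos hc, if_pos hd]
          simp only [pvSimul, hc, hc2, hd]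
          simp
        · rw [if_pos he, if_pos hc, if_neg hd, hstep]
          rw [ih (j + 1) (dots + 1) (by omega) (by omega)]
          simp only [pvSimul, hc, hc2, hd]
          simp
      · have hc2 : d2.reverse[j]'hlen2 ≠ '.' := he ▸ hc
        rw [if_pos he, if_neg hc, hstep]
        rw [ih (j + 1) dots (by omega) (by omega)]
        simp only [pvSimul, he', reduceIte]
        rw [if_neg hc]
    · rw [if_neg he]
      simp only [pvSimul]
      rw [if_neg he]

-- B's label lists, expressed through the canonical key
theorem pvTl_len_eq_iff (r : List Char) : (pvTl r).length = r.length ↔ '.' ∉ r := by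
  constructor
  · intro h hm
    have heq : pvTl r = r := (List.takeWhile_prefix _).eq_of_length h
    have := List.takeWhile_eq_self_iff.mp heq '.' hm
    simp at this
  · intro h
    have heq : pvTl r = r := List.takeWhile_eq_self_iff.mpr (by
      intro x hx
      simp
      intro hxe
      exact h (hxe ▸ hx))
    rw [heq]

theorem pvRp_tail (s : List Char) : (pvRpartitionDot s).2.2 = (pvTl s.reverse).reverse := by
  unfold pvRpartitionDot
  by_cases h : (s.reverse.takeWhile (fun c => c ≠ '.')).length = s.reverse.length
  · rw [if_pos h]
    have heq : pvTl s.reverse = s.reverse := (List.takeWhile_prefix _).eq_of_length h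
    rw [heq, List.reverse_reverse]
  · rw [if_neg h]
    rfl

theorem pvLastTwo_eq_K (s : List Char) :
    pvLastTwoLabels s = (match pvK s.reverse with
      | .inl r => [r.reverse]
      | .inr (x1, x2) => [x2.reverse, x1.reverse]) := by
  by_cases hd : '.' ∈ s.reverse
  · have hne : ¬ ((s.reverse.takeWhile (fun c => c ≠ '.')).length = s.reverse.length) := by
      intro h
      exact (pvTl_len_eq_iff s.reverse).mp h hd
    rw [pvK, if_pos hd]
    unfold pvLastTwoLabels
    rw [pvRpartitionDot]
    simp only [if_neg hne]
    rw [pvRp_tail]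
    rw [List.reverse_reverse]
    rfl
  · have h : (s.reverse.takeWhile (fun c => c ≠ '.')).length = s.reverse.length :=
      (pvTl_len_eq_iff s.reverse).mpr hd
    rw [pvK, if_neg hd]
    unfold pvLastTwoLabels
    rw [pvRpartitionDot]
    simp only [if_pos h]
    rw [List.reverse_reverse]

theorem pvLastTwo_beq (s t : List Char) :
    (pvLastTwoLabels s == pvLastTwoLabels t) = decide (pvK s.reverse = pvK t.reverse) := by
  rw [pvLastTwo_eq_K s, pvLastTwo_eq_K t]
  rcases pvK s.reverse with a | ⟨a1, a2⟩ <;> rcases pvK t.reverse with b | ⟨b1, b2⟩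
  · apply Bool.eq_iff_iff.mpr
    simp [List.reverse_inj]
  · apply Bool.eq_iff_iff.mpr
    simp
  · apply Bool.eq_iff_iff.mpr
    simp
  · apply Bool.eq_iff_iff.mpr
    simp [List.reverse_inj, and_comm]

-- ===== VERDICT (by name: the statement is the Claim_ definition above) =====
theorem is_same_primary_domain_spec : Claim_equal_is_same_primary_domain := by
  intro d1 d2 _
  unfold Spec_is_same_primary_domain is_same_primary_domain is_same_primary_domain_alt
  simp only [PySem.Str.len_eq]
  have h0 : (-1 : Int) = -((0 : Nat) : Int) - 1 := by norm_num
  rw [h0, ← Nat.cast_min, pvAloop_eq_simul d1.toList d2.toList (min d1.toList.length d2.toList.length) 0 0 (by omega) (by omega)]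
  simp only [List.drop_zero]
  rw [pvSimul_zero, pvLastTwo_beq]
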